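-- pv_equiv track=rewrite | github.com/S-Trespassing/astrbot_plugin | services/self_update.py | normalize_repo_url
-- ===== SOURCE A (Python) =====
-- def normalize_repo_url(repo_url: str) -> str:
--     value = (repo_url or "").strip()
--     if not value:
--         return ""
--     if value.startswith("git@github.com:"):
--         value = "https://github.com/" + value.split(":", 1)[1]
--     value = value.replace("http://github.com/", "https://github.com/")
--     if value.endswith(".git"):
--         value = value[:-4]
--     value = value.rstrip("/")
--     prefix = "https://github.com/"
--     if not value.startswith(prefix):
--         return ""
--     parts = [part for part in value[len(prefix) :].split("/") if part]
--     if len(parts) < 2: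
--         return ""
--     owner, repo_name = parts[0], parts[1]
--     return f"{prefix}{owner}/{repo_name}"
-- ===== SOURCE B (Python) =====
-- def normalize_repo_url(repo_url: str) -> str:
--     s = (repo_url or "").strip()
--     if s.startswith("git@github.com:"):
--         s = "https://github.com/" + s[len("git@github.com:"):]
--     s = s.replace("http://github.com/", "https://github.com/")
--     prefix = "https://github.com/"
--     if not s.startswith(prefix):
--         return ""
--     # trim one trailing ".git", then trailing slashes, by moving an end index
--     end = len(s)
--     if s.endswith(".git"):
--         end -= 4
--     while end > 0 and s[end - 1] == "/":
--         end -= 1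
--     # one state-machine pass over the path: 0=before owner, 1=in owner,
--     # 2=between owner and repo, 3=in repo, 4=past repo
--     owner, repo, field = "", "", 0
--     for c in s[len(prefix):end]:
--         if c == "/":
--             if field == 1 or field == 3:
--                 field += 1
--         else:
--             if field == 0:
--                 field = 1
--             elif field == 2:
--                 field = 3
--             if field == 1:
--                 owner += c
--             elif field == 3:
--                 repo += c
--     if field < 3:
--         return ""
--     return prefix + owner + "/" + repo
-- ===== Notes on version B (the rewrite author's own statement) =====
-- stated objective: alternative
-- what changed: A's staged suffix passes (slicing off a trailing dot-git, rstrip of trailing slashes) and its split/filter/len/index extraction of owner and repo are replaced by a moving end index computed with a backward scan plus one forward state-machine pass over the path that collects owner and repo directly, never building the list of segments; the prefix normalization steps are kept.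
import Mathlib
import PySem

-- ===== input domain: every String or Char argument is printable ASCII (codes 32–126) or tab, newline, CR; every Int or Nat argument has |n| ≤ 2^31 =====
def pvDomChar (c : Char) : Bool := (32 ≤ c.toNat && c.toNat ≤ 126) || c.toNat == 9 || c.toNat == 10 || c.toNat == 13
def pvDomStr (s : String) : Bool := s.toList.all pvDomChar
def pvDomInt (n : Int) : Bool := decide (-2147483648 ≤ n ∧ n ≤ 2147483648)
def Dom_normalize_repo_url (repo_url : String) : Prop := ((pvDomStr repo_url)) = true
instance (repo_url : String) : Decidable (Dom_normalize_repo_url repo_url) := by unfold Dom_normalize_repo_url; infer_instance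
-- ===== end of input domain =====

-- B replaces A's staged suffix-stripping plus split/filter/len/index extraction by a moving end
-- index and ONE state-machine pass over the path that collects owner and repo directly
-- (objective: alternative); the prefix normalization steps are shared.

-- value.rstrip("/") has no dedicated PySem primitive; this is its exact hand port for the
-- single strip-character '/' (mirrors the right half of PySem.Chars.stripChars).
def pyRstripSlash (s : List Char) : List Char :=
  (s.reverse.dropWhile (· == '/')).reverse

-- ===== PORT A =====
def normalize_repo_url_core (v0 : List Char) : String :=
  if v0 = [] then "" else
  let v1 := if PySem.Chars.startswith v0 "git@github.com:".toList then
      "https://github.com/".toList ++ (((PySem.Chars.splitMax? v0 [':'] 1).getD []).getD 1 [])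
    else v0
  let v2 := PySem.Chars.replace v1 "http://github.com/".toList "https://github.com/".toList
  let v3 := if PySem.Chars.endswith v2 ".git".toList then PySem.List.slice v2 none (some (-4)) else v2
  let v4 := pyRstripSlash v3
  if ¬ PySem.Chars.startswith v4 "https://github.com/".toList then "" else
  let parts := ((PySem.Chars.split? (PySem.List.slice v4 (some 19) none) ['/']).getD []).filter (fun p => !p.isEmpty)
  if parts.length < 2 then "" else
  String.ofList ("https://github.com/".toList ++ parts.getD 0 [] ++ '/' :: parts.getD 1 [])

def normalize_repo_url (repo_url : String) : String :=
  normalize_repo_url_core (PySem.Chars.strip repo_url.toList)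

-- ===== PORT B =====
-- the body of Source B's while loop: decrement end while s[end-1] == '/'
def nru_trim (s : List Char) : Nat → Nat
  | 0 => 0
  | n + 1 => if s.getD n ' ' = '/' then nru_trim s n else n + 1

-- Source B's per-character state machine step; state = (owner, repo, field)
def nru_step (st : List Char × List Char × Nat) (c : Char) : List Char × List Char × Nat :=
  if c = '/' then
    if st.2.2 = 1 ∨ st.2.2 = 3 then (st.1, st.2.1, st.2.2 + 1) else st
  else
    let f := if st.2.2 = 0 then 1 else if st.2.2 = 2 then 3 else st.2.2
    if f = 1 then (st.1 ++ [c], st.2.1, f)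
    else if f = 3 then (st.1, st.2.1 ++ [c], f)
    else (st.1, st.2.1, f)

def normalize_repo_url_alt_core (v0 : List Char) : String :=
  let s1 := if PySem.Chars.startswith v0 "git@github.com:".toList then
      "https://github.com/".toList ++ v0.drop 15
    else v0
  let s := PySem.Chars.replace s1 "http://github.com/".toList "https://github.com/".toList
  if ¬ PySem.Chars.startswith s "https://github.com/".toList then "" else
  let e0 := if PySem.Chars.endswith s ".git".toList then s.length - 4 else s.length
  let e := nru_trim s e0
  let st := (PySem.List.slice s (some 19) (some (e : Int))).foldl nru_step ([], [], 0)
  if st.2.2 < 3 then "" else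
  String.ofList ("https://github.com/".toList ++ st.1 ++ '/' :: st.2.1)

def normalize_repo_url_alt (repo_url : String) : String :=
  normalize_repo_url_alt_core (PySem.Chars.strip repo_url.toList)

-- ===== PRECONDITION & SPEC =====
def Spec_normalize_repo_url (repo_url : String) (out : String) : Prop := out = normalize_repo_url_alt repo_url
instance (repo_url : String) (out : String) : Decidable (Spec_normalize_repo_url repo_url out) := by unfold Spec_normalize_repo_url; infer_instance

-- ===== CLAIM (what is proved, stated in full; the proofs are below) =====
def Claim_equal_normalize_repo_url : Prop := ∀ (repo_url : String), Dom_normalize_repo_url repo_url → Spec_normalize_repo_url repo_url (normalize_repo_url repo_url)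

-- ===== LEMMAS AND PROOFS =====

-- the non-empty '/'-separated segments of a list, by direct recursion
def pvTokens : List Char → List (List Char)
  | [] => []
  | c :: r =>
    if c == '/' then pvTokens r
    else (c :: r.takeWhile (· != '/')) :: pvTokens (r.dropWhile (· != '/'))
termination_by l => l.length
decreasing_by all_goals (have := List.length_dropWhile_le (· != '/') r; simp only [List.length_cons]; omega)

lemma pvGo_slash (l : List Char) : ∀ (fuel : Nat) (cur : List Char) (acc : List (List Char)),
    l.length < fuel →
    PySem.Chars.splitOn.go ['/'] fuel l cur acc
      = acc.reverse ++ (List.splitOnP (· == '/') l).modifyHead (cur.reverse ++ ·) := by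
  induction l with
  | nil =>
    intro fuel cur acc h
    match fuel, h with
    | fuel+1, _ =>
      simp [PySem.Chars.splitOn.go, List.splitOnP_nil]
  | cons c r ih =>
    intro fuel cur acc h
    match fuel, h with
    | fuel+1, h' =>
      rw [PySem.Chars.splitOn.go]
      by_cases hc : c = '/'
      · subst hc
        have hp : List.isPrefixOf ['/'] ('/' :: r) = true := by simp [List.isPrefixOf]
        rw [if_pos hp]
        simp only [List.length_singleton, List.drop_succ_cons, List.drop_zero]
        rw [ih fuel [] _ (by simp at h'; omega)]
        simp [List.splitOnP_cons]
        cases List.splitOnP (fun x => x == '/') r <;> simp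
      · have hp : List.isPrefixOf ['/'] (c :: r) = false := by
          simp [List.isPrefixOf]; exact fun hq => absurd hq.symm hc
        rw [if_neg (by simp [hp])]
        rw [ih fuel (c :: cur) acc (by simp at h'; omega)]
        simp [List.splitOnP_cons, hc, List.modifyHead_modifyHead, Function.comp_def]

lemma pvSplitOn_slash (cs : List Char) :
    PySem.Chars.splitOn cs ['/'] = List.splitOnP (· == '/') cs := by
  rw [PySem.Chars.splitOn, pvGo_slash cs (cs.length+1) [] [] (by omega)]
  cases List.splitOnP (· == '/') cs <;> simp

lemma pvSplitOnP_head (r : List Char) :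
    List.splitOnP (· == '/') r = r.takeWhile (· != '/') ::
      (match r.dropWhile (· != '/') with | [] => [] | _ :: t => List.splitOnP (· == '/') t) := by
  induction r with
  | nil => simp [List.splitOnP_nil]
  | cons c t ih =>
    by_cases hc : c = '/'
    · subst hc
      simp [List.splitOnP_cons]
    · simp only [List.splitOnP_cons, List.takeWhile_cons, List.dropWhile_cons, hc,
        beq_iff_eq, bne_iff_ne, ne_eq, not_false_iff, if_pos, ih,
        List.modifyHead_cons]
      simp

lemma pvFilter_splitOnP (l : List Char) :
    (List.splitOnP (· == '/') l).filter (fun p => !p.isEmpty) = pvTokens l := by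
  induction l using pvTokens.induct with
  | case1 => simp [List.splitOnP_nil, pvTokens]
  | case2 c r hc ih =>
    have hc' : c = '/' := by simpa using hc
    subst hc'
    rw [List.splitOnP_cons]
    simp only [beq_self_eq_true, if_pos]
    rw [pvTokens]
    simpa using ih
  | case3 c r hc ih =>
    have hc' : ¬ c = '/' := by simpa using hc
    rw [pvSplitOnP_head (c :: r)]
    rw [pvTokens]
    simp only [hc, List.takeWhile_cons, List.dropWhile_cons, bne_iff_ne, ne_eq, hc',
      not_false_iff, if_pos]
    rw [List.filter_cons]
    simp only [List.isEmpty_cons, Bool.not_false, if_pos]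
    congr 1
    cases hd : r.dropWhile (· != '/') with
      | nil => simp [pvTokens]
      | cons x t =>
        have hx : (x != '/') = false := by
          have := List.head_dropWhile_not (· != '/') (l := r) (by rw [hd]; simp)
          simpa [hd] using this
        have hx' : x = '/' := by simpa using hx
        rw [hd] at ih
        subst hx'
        rw [List.splitOnP_cons] at ih
        simpa using ih

lemma pvTokens_dropSlash (l : List Char) :
    pvTokens l = pvTokens (l.dropWhile (· == '/')) := by
  induction l with
  | nil => rfl
  | cons c r ih =>
    by_cases hc : c = '/'
    · subst hc
      rw [pvTokens, List.dropWhile_cons]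
      simpa using ih
    · rw [List.dropWhile_cons]
      simp [hc]

lemma pvTail_eq (cs pfx : List Char) :
    (if ((List.splitOnP (· == '/') cs).filter (fun p => !p.isEmpty)).length < 2 then ""
     else String.ofList (pfx ++ ((List.splitOnP (· == '/') cs).filter (fun p => !p.isEmpty)).getD 0 []
            ++ '/' :: ((List.splitOnP (· == '/') cs).filter (fun p => !p.isEmpty)).getD 1 []))
    = (if ((cs.dropWhile (· == '/')).takeWhile (· != '/')).isEmpty
          || (((((cs.dropWhile (· == '/')).dropWhile (· != '/')).drop 1).dropWhile (· == '/')).takeWhile (· != '/')).isEmpty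
       then ""
       else String.ofList (pfx ++ (cs.dropWhile (· == '/')).takeWhile (· != '/')
              ++ '/' :: ((((cs.dropWhile (· == '/')).dropWhile (· != '/')).drop 1).dropWhile (· == '/')).takeWhile (· != '/'))) := by
  rw [pvFilter_splitOnP, pvTokens_dropSlash]
  cases h : cs.dropWhile (· == '/') with
  | nil => simp [pvTokens]
  | cons c r =>
    have hc : ¬ c = '/' := by
      have := List.head_dropWhile_not (· == '/') (l := cs) (by rw [h]; simp)
      simpa [h] using this
    rw [pvTokens]
    simp only [List.takeWhile_cons, List.dropWhile_cons, bne_iff_ne, ne_eq, hc, not_false_iff,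
      if_pos, beq_iff_eq, if_neg]
    cases h2 : r.dropWhile (· != '/') with
    | nil => simp [pvTokens]
    | cons x t =>
      have hx : x = '/' := by
        have := List.head_dropWhile_not (· != '/') (l := r) (by rw [h2]; simp)
        simpa [h2] using this
      subst hx
      rw [pvTokens]
      simp only [beq_self_eq_true, if_pos, List.drop_succ_cons, List.drop_zero]
      rw [pvTokens_dropSlash t]
      cases h3 : t.dropWhile (· == '/') with
      | nil => simp [pvTokens]
      | cons d u =>
        have hd : ¬ d = '/' := by
          have := List.head_dropWhile_not (· == '/') (l := t) (by rw [h3]; simp)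
          simpa [h3] using this
        rw [pvTokens]
        simp [hd, List.getD]

-- ---- A's split(":", 1)[1] equals B's drop 15 on strings with the git@ prefix ----

lemma pvGoColonDone (l' : List Char) (f : Nat) (acc : List (List Char)) (h : l'.length < f) :
    PySem.Chars.splitOnMax.go [':'] f 0 l' [] acc = (l' :: acc).reverse := by
  match f, h with
  | f+1, _ =>
    cases l' <;> rw [PySem.Chars.splitOnMax.go] <;> simp

lemma pvGoColon (l : List Char) : ∀ (f : Nat) (cur : List Char) (acc : List (List Char)),
    l.length < f →
    PySem.Chars.splitOnMax.go [':'] f 1 l cur acc =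
      (match l.dropWhile (· ≠ ':') with
       | [] => ((cur.reverse ++ l) :: acc).reverse
       | _ :: t => acc.reverse ++ [cur.reverse ++ l.takeWhile (· ≠ ':'), t]) := by
  induction l with
  | nil =>
    intro f cur acc h
    match f, h with
    | f+1, _ =>
      rw [PySem.Chars.splitOnMax.go]
      simp
      omega
  | cons c r ih =>
    intro f cur acc h
    match f, h with
    | f+1, h' =>
      rw [PySem.Chars.splitOnMax.go]
      by_cases hc : c = ':'
      · subst hc
        have hp : List.isPrefixOf [':'] (':' :: r) = true := by simp [List.isPrefixOf]
        simp only [hp, if_pos, Nat.one_ne_zero, if_neg, if_true, List.length_singleton,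
          List.drop_succ_cons, List.drop_zero]
        rw [pvGoColonDone r f _ (by simp at h'; omega)]
        simp [List.dropWhile_cons]
      · have hp : List.isPrefixOf [':'] (c :: r) = false := by
          simp [List.isPrefixOf]; exact fun hq => absurd hq.symm hc
        simp only [hp, Nat.one_ne_zero, if_neg, if_false, Bool.false_eq_true]
        rw [ih f (c :: cur) acc (by simp at h'; omega)]
        simp only [List.dropWhile_cons, List.takeWhile_cons, ne_eq, hc, not_false_iff,
          decide_true, if_pos]
        cases r.dropWhile (· ≠ ':') <;> simp

lemma pvGitSplit (v0 : List Char) (h : PySem.Chars.startswith v0 "git@github.com:".toList = true) :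
    ((PySem.Chars.splitMax? v0 [':'] 1).getD []).getD 1 [] = v0.drop 15 := by
  obtain ⟨t, ht⟩ := (PySem.Chars.startswith_iff _ _).1 h
  have hpfx : "git@github.com:".toList = ['g','i','t','@','g','i','t','h','u','b','.','c','o','m',':'] := by decide
  subst ht
  rw [hpfx]
  rw [PySem.Chars.splitMax?]
  simp only [List.isEmpty_cons, Bool.false_eq_true, if_neg, Option.getD_some,
    Bool.false_eq_true, not_false_iff]
  rw [PySem.Chars.splitOnMax]
  rw [if_neg (by omega)]
  simp only [Int.toNat_one]
  rw [pvGoColon _ _ [] [] (by omega)]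
  simp [List.dropWhile_cons, List.takeWhile_cons, List.getD]

-- ---- the moving end index equals rstrip("/") on the corresponding prefix ----

lemma pvTrim_take (s : List Char) : ∀ n, n ≤ s.length →
    s.take (nru_trim s n) = pyRstripSlash (s.take n) := by
  intro n
  induction n with
  | zero => intro _; simp [nru_trim, pyRstripSlash]
  | succ m ih =>
    intro hm
    have hmlt : m < s.length := by omega
    have htake : s.take (m+1) = s.take m ++ [s[m]] := List.take_succ_eq_append_getElem hmlt
    have hget : s.getD m ' ' = s[m] := by simp [List.getD_eq_getElem?_getD, hmlt]
    rw [nru_trim]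
    by_cases hc : s.getD m ' ' = '/'
    · rw [if_pos hc, ih (by omega)]
      unfold pyRstripSlash
      rw [htake]
      simp only [List.reverse_append, List.reverse_cons, List.reverse_nil, List.nil_append,
        List.cons_append, List.dropWhile_cons]
      rw [hget] at hc
      simp [hc]
    · rw [if_neg hc]
      unfold pyRstripSlash
      rw [htake]
      simp only [List.reverse_append, List.reverse_cons, List.reverse_nil, List.nil_append,
        List.cons_append, List.dropWhile_cons]
      rw [hget] at hc
      have hc' : ¬ ((s[m] == '/') = true) := by simp [hc]
      rw [if_neg hc', List.reverse_cons, List.reverse_reverse]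

lemma pvTrim_le (s : List Char) (n : Nat) : nru_trim s n ≤ n := by
  induction n with
  | zero => simp [nru_trim]
  | succ m ih => rw [nru_trim]; split <;> omega

-- ---- the state machine, phase by phase ----

lemma pvM4 (l : List Char) (o r : List Char) :
    l.foldl nru_step (o, r, 4) = (o, r, 4) := by
  induction l with
  | nil => rfl
  | cons c t ih =>
    rw [List.foldl_cons]
    have : nru_step (o, r, 4) c = (o, r, 4) := by
      unfold nru_step; split <;> simp
    rw [this, ih]

lemma pvM3 (l : List Char) : ∀ (o r : List Char),
    l.foldl nru_step (o, r, 3) =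
      (match l.dropWhile (· != '/') with
       | [] => (o, r ++ l.takeWhile (· != '/'), 3)
       | _ :: t => t.foldl nru_step (o, r ++ l.takeWhile (· != '/'), 4)) := by
  induction l with
  | nil => intro o r; simp
  | cons c t ih =>
    intro o r
    rw [List.foldl_cons]
    by_cases hc : c = '/'
    · subst hc
      have : nru_step (o, r, 3) '/' = (o, r, 4) := by unfold nru_step; simp
      rw [this]
      simp [List.dropWhile_cons, List.takeWhile_cons]
    · have : nru_step (o, r, 3) c = (o, r ++ [c], 3) := by
        unfold nru_step; simp [hc]
      rw [this, ih]
      simp only [List.dropWhile_cons, List.takeWhile_cons, bne_iff_ne, ne_eq, hc,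
        not_false_iff, decide_true, if_pos]
      cases t.dropWhile (· != '/') <;> simp

lemma pvM2 (l : List Char) : ∀ (o : List Char),
    l.foldl nru_step (o, [], 2) =
      (match l.dropWhile (· == '/') with
       | [] => (o, [], 2)
       | c :: t => t.foldl nru_step (o, [c], 3)) := by
  induction l with
  | nil => intro o; simp
  | cons c t ih =>
    intro o
    rw [List.foldl_cons]
    by_cases hc : c = '/'
    · subst hc
      have : nru_step (o, [], 2) '/' = (o, [], 2) := by unfold nru_step; simp
      rw [this, ih]
      simp [List.dropWhile_cons]
    · have : nru_step (o, [], 2) c = (o, [c], 3) := by unfold nru_step; simp [hc]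
      rw [this]
      simp [List.dropWhile_cons, hc]

lemma pvM1 (l : List Char) : ∀ (o : List Char),
    l.foldl nru_step (o, [], 1) =
      (match l.dropWhile (· != '/') with
       | [] => (o ++ l.takeWhile (· != '/'), [], 1)
       | _ :: t => t.foldl nru_step (o ++ l.takeWhile (· != '/'), [], 2)) := by
  induction l with
  | nil => intro o; simp
  | cons c t ih =>
    intro o
    rw [List.foldl_cons]
    by_cases hc : c = '/'
    · subst hc
      have : nru_step (o, [], 1) '/' = (o, [], 2) := by unfold nru_step; simp
      rw [this]
      simp [List.dropWhile_cons, List.takeWhile_cons]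
    · have : nru_step (o, [], 1) c = (o ++ [c], [], 1) := by unfold nru_step; simp [hc]
      rw [this, ih]
      simp only [List.dropWhile_cons, List.takeWhile_cons, bne_iff_ne, ne_eq, hc,
        not_false_iff, decide_true, if_pos]
      cases t.dropWhile (· != '/') <;> simp

lemma pvM0 (l : List Char) :
    l.foldl nru_step ([], [], 0) =
      (match l.dropWhile (· == '/') with
       | [] => ([], [], 0)
       | c :: t => t.foldl nru_step ([c], [], 1)) := by
  induction l with
  | nil => simp
  | cons c t ih =>
    rw [List.foldl_cons]
    by_cases hc : c = '/'
    · subst hc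
      have : nru_step ([], [], 0) '/' = ([], [], 0) := by unfold nru_step; simp
      rw [this, ih]
      simp [List.dropWhile_cons]
    · have : nru_step ([], [], 0) c = ([c], [], 1) := by unfold nru_step; simp [hc]
      rw [this]
      simp [List.dropWhile_cons, hc]

-- the machine's verdict on a path equals the dropWhile/takeWhile segment expression
lemma pvMachine_eq (l pfx : List Char) :
    (if (l.foldl nru_step ([], [], 0)).2.2 < 3 then ""
     else String.ofList (pfx ++ (l.foldl nru_step ([], [], 0)).1
            ++ '/' :: (l.foldl nru_step ([], [], 0)).2.1))
    = (if ((l.dropWhile (· == '/')).takeWhile (· != '/')).isEmpty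
          || (((((l.dropWhile (· == '/')).dropWhile (· != '/')).drop 1).dropWhile (· == '/')).takeWhile (· != '/')).isEmpty
       then ""
       else String.ofList (pfx ++ (l.dropWhile (· == '/')).takeWhile (· != '/')
              ++ '/' :: ((((l.dropWhile (· == '/')).dropWhile (· != '/')).drop 1).dropWhile (· == '/')).takeWhile (· != '/'))) := by
  rw [pvM0]
  cases h : l.dropWhile (· == '/') with
  | nil => simp
  | cons c t =>
    have hc : ¬ c = '/' := by
      have := List.head_dropWhile_not (· == '/') (l := l) (by rw [h]; simp)
      simpa [h] using this
    dsimp only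
    simp only [pvM1]
    simp only [List.takeWhile_cons, List.dropWhile_cons, bne_iff_ne, ne_eq, hc, not_false_iff,
      decide_true, if_pos]
    cases h2 : t.dropWhile (· != '/') with
    | nil => simp
    | cons x t2 =>
      dsimp only
      simp only [pvM2]
      simp only [List.drop_succ_cons, List.drop_zero]
      cases h3 : t2.dropWhile (· == '/') with
      | nil => simp
      | cons d t3 =>
        have hd : ¬ d = '/' := by
          have := List.head_dropWhile_not (· == '/') (l := t2) (by rw [h3]; simp)
          simpa [h3] using this
        dsimp only
        simp only [pvM3]
        simp only [List.takeWhile_cons, List.dropWhile_cons, bne_iff_ne, ne_eq, hd,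
          not_false_iff, decide_true, if_pos]
        cases h4 : t3.dropWhile (· != '/') with
        | nil => simp
        | cons y t4 =>
          dsimp only
          simp only [pvM4]
          simp

-- ---- prefix bookkeeping ----

lemma pvPfx_len : ("https://github.com/".toList).length = 19 := by decide

lemma pvStarts_take (v : List Char) (e : Nat)
    (hp : PySem.Chars.startswith v "https://github.com/".toList = true) (he : 19 ≤ e) :
    PySem.Chars.startswith (v.take e) "https://github.com/".toList = true := by
  rw [PySem.Chars.startswith_iff] at hp ⊢
  rw [List.prefix_iff_eq_take] at hp ⊢
  rw [pvPfx_len] at hp ⊢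
  rw [List.take_take, min_eq_left he, hp]

lemma pvStarts_of_take (v : List Char) (e : Nat)
    (hp : PySem.Chars.startswith (v.take e) "https://github.com/".toList = true) :
    PySem.Chars.startswith v "https://github.com/".toList = true := by
  rw [PySem.Chars.startswith_iff] at hp ⊢
  exact hp.trans (List.take_prefix e v)

lemma pvLen_take (v : List Char) (e : Nat)
    (hp : PySem.Chars.startswith (v.take e) "https://github.com/".toList = true) : 19 ≤ e := by
  rw [PySem.Chars.startswith_iff] at hp
  have := hp.length_le
  rw [pvPfx_len, List.length_take] at this
  omega

-- ---- the two cores agree ----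

lemma pvCore_eq (v0 : List Char) : normalize_repo_url_core v0 = normalize_repo_url_alt_core v0 := by
  by_cases h0 : v0 = []
  · subst h0; decide
  · rw [normalize_repo_url_core, normalize_repo_url_alt_core, if_neg h0]
    have hv1 : (if PySem.Chars.startswith v0 "git@github.com:".toList = true then
        "https://github.com/".toList ++ (((PySem.Chars.splitMax? v0 [':'] 1).getD []).getD 1 [])
      else v0) = (if PySem.Chars.startswith v0 "git@github.com:".toList = true then
        "https://github.com/".toList ++ v0.drop 15 else v0) := by
      by_cases hg : PySem.Chars.startswith v0 "git@github.com:".toList = true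
      · rw [if_pos hg, if_pos hg, pvGitSplit v0 hg]
      · rw [if_neg hg, if_neg hg]
    simp only [hv1]
    set v2 := PySem.Chars.replace
        (if PySem.Chars.startswith v0 "git@github.com:".toList = true then
          "https://github.com/".toList ++ v0.drop 15 else v0)
        "http://github.com/".toList "https://github.com/".toList with hv2
    set e0 := (if PySem.Chars.endswith v2 ".git".toList = true then v2.length - 4 else v2.length) with he0
    have he0le : e0 ≤ v2.length := by rw [he0]; split <;> omega
    set e := nru_trim v2 e0 with he
    have hele : e ≤ v2.length := le_trans (pvTrim_le v2 e0) he0le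
    have hv3 : (if PySem.Chars.endswith v2 ".git".toList = true then
        PySem.List.slice v2 none (some (-4)) else v2) = v2.take e0 := by
      rw [he0]
      by_cases hgit : PySem.Chars.endswith v2 ".git".toList = true
      · rw [if_pos hgit, if_pos hgit, PySem.List.slice_to_neg_ofNat v2 4 (by omega)]
      · rw [if_neg hgit, if_neg hgit, List.take_length]
    have hv4 : pyRstripSlash (if PySem.Chars.endswith v2 ".git".toList = true then
        PySem.List.slice v2 none (some (-4)) else v2) = v2.take e := by
      rw [hv3, he, pvTrim_take v2 e0 he0le]
    rw [hv4]
    by_cases hq : PySem.Chars.startswith (v2.take e) "https://github.com/".toList = true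
    · have hp : PySem.Chars.startswith v2 "https://github.com/".toList = true :=
        pvStarts_of_take v2 e hq
      have h19 : 19 ≤ e := pvLen_take v2 e hq
      rw [if_neg (not_not_intro hq), if_neg (not_not_intro hp)]
      have hslice1 : PySem.List.slice (v2.take e) (some 19) none = (v2.take e).drop 19 := by
        have := PySem.List.slice_from_natCast (v2.take e) 19
        simpa using this
      have hslice2 : PySem.List.slice v2 (some 19) (some (e : Int)) = (v2.take e).drop 19 := by
        have := PySem.List.slice_natCast v2 19 e
        simp only [Nat.cast_ofNat] at this
        rw [this, List.drop_take]
      rw [hslice1, hslice2]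
      rw [PySem.Chars.split?]
      simp only [List.isEmpty_cons, Bool.false_eq_true, not_false_iff, if_neg, Option.getD_some]
      rw [pvSplitOn_slash, pvTail_eq, ← pvMachine_eq]
    · rw [if_pos hq]
      by_cases hp : PySem.Chars.startswith v2 "https://github.com/".toList = true
      · rw [if_neg (not_not_intro hp)]
        have h19 : ¬ 19 ≤ e := fun h => hq (pvStarts_take v2 e hp h)
        have hslice2 : PySem.List.slice v2 (some 19) (some (e : Int)) = [] := by
          have := PySem.List.slice_natCast v2 19 e
          simp only [Nat.cast_ofNat] at this
          rw [this]
          have : e - 19 = 0 := by omega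
          simp [this]
        rw [hslice2]
        simp
      · rw [if_pos hp]

-- ===== VERDICT (by name: the statement is the Claim_ definition above) =====
theorem normalize_repo_url_spec : Claim_equal_normalize_repo_url := by
  intro repo_url _
  unfold Spec_normalize_repo_url normalize_repo_url normalize_repo_url_alt
  exact pvCore_eq _
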